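-- pv_equiv track=rewrite | github.com/THU-KEG/OmniEvent | OmniEvent/input_engineering/mrc_converter.py | _get_best_indexes
-- ===== SOURCE A (Python) =====
-- from typing import Dict, List, Optional
--
-- def _get_best_indexes(logits: List[int],
--                       n_best_size: Optional[int] = 1,
--                       larger_than_cls: Optional[bool] = False,
--                       cls_logit: Optional[int] = None) -> List[int]:
--     """Gets the n-best logits from a list.
--
--     Gets the n-best logits from a list. The methods returns a list containing the indexes of the n-best logits that
--     satisfies both the logits are n-best and greater than the logit of the "cls" token.
--     """
--     index_and_score = sorted(enumerate(logits), key=lambda x: x[1], reverse=True)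
--
--     best_indexes = []
--     for i in range(len(index_and_score)):
--         if i >= n_best_size:
--             break
--         if larger_than_cls:
--             if index_and_score[i][1] < cls_logit:
--                 break
--         best_indexes.append(index_and_score[i][0])
--     return best_indexes
-- ===== SOURCE B (Python) =====
-- from typing import Dict, List, Optional
--
-- def _get_best_indexes(logits: List[int],
--                       n_best_size: Optional[int] = 1,
--                       larger_than_cls: Optional[bool] = False,
--                       cls_logit: Optional[int] = None) -> List[int]:
--     """Selection-based top-k: repeatedly extract the maximum unused logit (first
--     occurrence on ties, matching stable sort order); no sorting at all."""
--     used = set()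
--     best_indexes = []
--     while len(best_indexes) < n_best_size:
--         best = None  # (index, value) of current maximum among unused
--         for i, v in enumerate(logits):
--             if i not in used and (best is None or v > best[1]):
--                 best = (i, v)
--         if best is None:
--             break
--         if larger_than_cls and best[1] < cls_logit:
--             break
--         used.add(best[0])
--         best_indexes.append(best[0])
--     return best_indexes
-- ===== Notes on version B (the rewrite author's own statement) =====
-- stated objective: alternative
-- what changed: B replaces A's full stable sort followed by a break-scan with sort-free selection: it repeatedly scans for the maximum unused logit (strictly-greater comparison keeps the first occurrence on ties, reproducing stable-sort order), stopping after n picks, when entries run out, or at the first pick below cls.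
import Mathlib
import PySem

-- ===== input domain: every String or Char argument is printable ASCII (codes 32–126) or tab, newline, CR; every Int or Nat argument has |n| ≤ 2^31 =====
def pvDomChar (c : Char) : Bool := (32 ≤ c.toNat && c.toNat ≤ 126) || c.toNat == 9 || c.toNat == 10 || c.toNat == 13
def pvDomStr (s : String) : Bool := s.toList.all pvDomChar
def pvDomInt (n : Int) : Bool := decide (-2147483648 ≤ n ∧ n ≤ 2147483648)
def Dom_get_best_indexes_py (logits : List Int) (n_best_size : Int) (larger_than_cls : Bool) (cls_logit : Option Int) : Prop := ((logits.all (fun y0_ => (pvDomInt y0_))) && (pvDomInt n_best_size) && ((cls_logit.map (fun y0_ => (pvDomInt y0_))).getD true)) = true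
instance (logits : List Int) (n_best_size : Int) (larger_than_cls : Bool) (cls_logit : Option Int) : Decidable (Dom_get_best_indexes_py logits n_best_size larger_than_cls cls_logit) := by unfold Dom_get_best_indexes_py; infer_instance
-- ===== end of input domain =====

-- B replaces A's stable sort + break-scan by sort-free selection: repeatedly extract the
-- maximum unused logit (first occurrence on ties), stop at n picks, exhaustion, or below cls.

-- ===== PORT A =====
-- the loop 'for i in range(len(index_and_score)): if i >= n: break; if larger and s[i][1] < cls: break; append'
-- as structural recursion over the sorted list with the counter i; the 'none' branch of the
-- cls comparison is unreachable under Pre_ (Python raises TypeError there).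
def clsBreak (larger : Bool) (cls : Option Int) (v : Int) : Bool :=
  larger && (match cls with | some c => decide (v < c) | none => false)

def getBestLoopA (n : Int) (larger : Bool) (cls : Option Int) :
    List (Int × Int) → Int → List Int → List Int
  | [], _, acc => acc
  | x :: t, i, acc =>
    if n ≤ i then acc
    else if clsBreak larger cls x.2 then acc
    else getBestLoopA n larger cls t (i + 1) (acc ++ [x.1])

def get_best_indexes_py (logits : List Int) (n_best_size : Int) (larger_than_cls : Bool) (cls_logit : Option Int) : List Int :=
  getBestLoopA n_best_size larger_than_cls cls_logit
    (PySem.List.sorted (PySem.List.enumerate logits 0) (fun x => x.2) true) 0 []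

-- ===== PORT B =====
-- 'best = None; for i, v in enumerate(logits): if i not in used and (best is None or v > best[1]): best = (i, v)'
def findBest (pairs : List (Int × Int)) (used : PySem.Set Int) : Option (Int × Int) :=
  pairs.foldl (fun best p =>
    if !(PySem.Set.contains used p.1) &&
       (match best with | none => true | some b => decide (b.2 < p.2)) then some p else best) none

-- the while-loop; fuel = len(logits) bounds the picks (after that findBest is none anyway);
-- 'cls.getD 0' : the comparison is only reached with cls = some … under Pre_ (else Python raises TypeError).
def selLoopB (pairs : List (Int × Int)) (n : Int) (larger : Bool) (cls : Option Int) :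
    Nat → PySem.Set Int → List Int → List Int
  | 0, _, acc => acc
  | fuel+1, used, acc =>
    if n ≤ (acc.length : Int) then acc
    else
      match findBest pairs used with
      | none => acc
      | some b =>
        if larger && decide (b.2 < cls.getD 0) then acc
        else selLoopB pairs n larger cls fuel (PySem.Set.add used b.1) (acc ++ [b.1])

def get_best_indexes_py_alt (logits : List Int) (n_best_size : Int) (larger_than_cls : Bool) (cls_logit : Option Int) : List Int :=
  selLoopB (PySem.List.enumerate logits 0) n_best_size larger_than_cls cls_logit
    logits.length PySem.Set.empty []

-- ===== PRECONDITION & SPEC =====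
-- Pre_ excludes exactly the inputs on which the Python A (and B) raises TypeError ('int < None'):
-- larger_than_cls set with cls_logit = None while the comparison is actually reached.
def Pre_get_best_indexes_py (logits : List Int) (n_best_size : Int) (larger_than_cls : Bool) (cls_logit : Option Int) : Prop :=
  larger_than_cls = true ∧ cls_logit = none → logits = [] ∨ n_best_size ≤ 0
instance (logits : List Int) (n_best_size : Int) (larger_than_cls : Bool) (cls_logit : Option Int) : Decidable (Pre_get_best_indexes_py logits n_best_size larger_than_cls cls_logit) := by unfold Pre_get_best_indexes_py; infer_instance
def pvWitness_get_best_indexes_py : List Int × Int × Bool × Option Int := ([3, 1, 2], 2, true, some 2)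
def Spec_get_best_indexes_py (logits : List Int) (n_best_size : Int) (larger_than_cls : Bool) (cls_logit : Option Int) (out : List Int) : Prop := out = get_best_indexes_py_alt logits n_best_size larger_than_cls cls_logit
instance (logits : List Int) (n_best_size : Int) (larger_than_cls : Bool) (cls_logit : Option Int) (out : List Int) : Decidable (Spec_get_best_indexes_py logits n_best_size larger_than_cls cls_logit out) := by unfold Spec_get_best_indexes_py; infer_instance

-- ===== CLAIM (what is proved, stated in full; the proofs are below) =====
def Claim_equal_get_best_indexes_py : Prop := ∀ (logits : List Int) (n_best_size : Int) (larger_than_cls : Bool) (cls_logit : Option Int), Dom_get_best_indexes_py logits n_best_size larger_than_cls cls_logit → Pre_get_best_indexes_py logits n_best_size larger_than_cls cls_logit → Spec_get_best_indexes_py logits n_best_size larger_than_cls cls_logit (get_best_indexes_py logits n_best_size larger_than_cls cls_logit)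

-- ===== LEMMAS AND PROOFS =====

-- the order of A's stable descending sort on an enumerate list: larger value first, ties by smaller index
def pvLex (a b : Int × Int) : Prop := b.2 < a.2 ∨ (a.2 = b.2 ∧ a.1 < b.1)

theorem pvLex_trans {a b c : Int × Int} (h1 : pvLex a b) (h2 : pvLex b c) : pvLex a c := by
  unfold pvLex at *; omega

theorem pvLex_asymm {a b : Int × Int} (h1 : pvLex a b) (h2 : pvLex b a) : False := by
  unfold pvLex at *; omega

-- A's loop collects the first indices of the sorted list: stop at n, stop at the first below-cls value.
theorem getBestLoopA_spec (n : Int) (larger : Bool) (cls : Option Int) :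
    ∀ (l : List (Int × Int)) (i : Int) (acc : List Int),
      getBestLoopA n larger cls l i acc =
        acc ++ ((l.take (n - i).toNat).takeWhile
          (fun x => !clsBreak larger cls x.2)).map (fun p => p.1) := by
  intro l
  induction l with
  | nil => intro i acc; simp [getBestLoopA]
  | cons x t ih =>
    intro i acc
    rw [getBestLoopA]
    by_cases hni : n ≤ i
    · have h0 : (n - i).toNat = 0 := by omega
      rw [if_pos hni, h0]
      simp
    · have h1 : (n - i).toNat = (n - (i + 1)).toNat + 1 := by omega
      rw [if_neg hni, h1, List.take_succ_cons, List.takeWhile_cons]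
      cases hstop : clsBreak larger cls x.2 with
      | true => simp
      | false => rw [if_neg (by simp), ih]; simp

-- one stable descending insertion preserves pairwise pvLex, given the new element has the largest index
theorem insertBy_pairwise_lex (x : Int × Int) :
    ∀ (l : List (Int × Int)), l.Pairwise pvLex → (∀ a ∈ l, a.1 < x.1) →
      (PySem.List.insertBy (fun a b => decide (b.2 < a.2)) x l).Pairwise pvLex := by
  intro l
  induction l with
  | nil => intro _ _; simp [PySem.List.insertBy, pvLex]
  | cons y t ih =>
    intro hp hfst
    rcases List.pairwise_cons.mp hp with ⟨hy, ht⟩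
    by_cases h : y.2 < x.2
    · rw [PySem.List.insertBy, if_pos (by simpa using h)]
      refine List.pairwise_cons.mpr ⟨?_, hp⟩
      intro z hz
      rcases List.mem_cons.mp hz with hz | hz
      · subst hz; exact Or.inl h
      · exact pvLex_trans (Or.inl h) (hy z hz)
    · rw [PySem.List.insertBy, if_neg (by simpa using h)]
      refine List.pairwise_cons.mpr ⟨?_, ih ht (fun a ha => hfst a (List.mem_cons_of_mem _ ha))⟩
      intro z hz
      rcases (PySem.List.mem_insertBy _ _ _ _).mp hz with hz | hz
      · subst hz
        rcases lt_or_eq_of_le (le_of_not_gt h) with h' | h'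
        · exact Or.inl h'
        · exact Or.inr ⟨h'.symm, hfst y List.mem_cons_self⟩
      · exact hy z hz

-- the stable descending sort of an index-increasing list is pairwise pvLex
theorem foldl_insertBy_pairwise_lex :
    ∀ (l acc : List (Int × Int)), l.Pairwise (fun a b => a.1 < b.1) → acc.Pairwise pvLex →
      (∀ a ∈ acc, ∀ b ∈ l, a.1 < b.1) →
      (l.foldl (fun acc x => PySem.List.insertBy (fun a b => decide (b.2 < a.2)) x acc) acc).Pairwise pvLex := by
  intro l
  induction l with
  | nil => intro acc _ hacc _; simpa using hacc
  | cons x t ih =>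
    intro acc hl hacc hcross
    rcases List.pairwise_cons.mp hl with ⟨hx, ht⟩
    rw [List.foldl_cons]
    refine ih _ ht ?_ ?_
    · exact insertBy_pairwise_lex x acc hacc
        (fun a ha => hcross a ha x List.mem_cons_self)
    · intro a ha b hb
      rcases (PySem.List.mem_insertBy _ _ _ _).mp ha with ha | ha
      · subst ha; exact hx b hb
      · exact hcross a ha b (List.mem_cons_of_mem _ hb)

theorem sorted_rev_pairwise_lex (xs : List (Int × Int))
    (h : xs.Pairwise (fun a b => a.1 < b.1)) :
    (PySem.List.sorted xs (fun x => x.2) true).Pairwise pvLex := by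
  rw [PySem.List.sorted_rev_eq_foldl_insertBy]
  exact foldl_insertBy_pairwise_lex xs [] h (by simp) (by simp)

-- findBest over a scan keeps the strictly greatest value seen, first occurrence on ties:
-- the fold from 'some b' produces the pvLex-maximum of b and the remaining unused elements.
def pvStep (best : Option (Int × Int)) (p : Int × Int) : Option (Int × Int) :=
  if (match best with | none => true | some b => decide (b.2 < p.2)) then some p else best

theorem pvStep_fold_max :
    ∀ (l : List (Int × Int)) (b : Int × Int), l.Pairwise (fun a b => a.1 < b.1) →
      (∀ q ∈ l, b.1 < q.1) →
      ∃ r, l.foldl pvStep (some b) = some r ∧ (r = b ∨ r ∈ l) ∧ (b = r ∨ pvLex r b) ∧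
        (∀ q ∈ l, q = r ∨ pvLex r q) := by
  intro l
  induction l with
  | nil => intro b _ _; exact ⟨b, rfl, Or.inl rfl, Or.inl rfl, by simp⟩
  | cons p t ih =>
    intro b hl hfst
    rcases List.pairwise_cons.mp hl with ⟨hp, ht⟩
    rw [List.foldl_cons]
    by_cases h : b.2 < p.2
    · rw [show pvStep (some b) p = some p by simp [pvStep, h]]
      obtain ⟨r, hr, hmem, hrp, hall⟩ := ih p ht hp
      refine ⟨r, hr, ?_, ?_, ?_⟩
      · rcases hmem with h' | h' <;> simp [h']
      · right
        rcases hrp with h' | h'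
        · subst h'; exact Or.inl h
        · exact pvLex_trans h' (Or.inl h)
      · intro q hq
        rcases List.mem_cons.mp hq with hq | hq
        · subst hq
          rcases hrp with h' | h'
          · exact Or.inl h'
          · exact Or.inr h'
        · exact hall q hq
    · rw [show pvStep (some b) p = some b by simp [pvStep]; omega]
      obtain ⟨r, hr, hmem, hrb, hall⟩ := ih b ht
        (fun q hq => lt_trans (hfst p List.mem_cons_self) (hp q hq))
      refine ⟨r, hr, ?_, hrb, ?_⟩
      · rcases hmem with h' | h' <;> simp [h']
      · intro q hq
        rcases List.mem_cons.mp hq with hq | hq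
        · -- q = p : r beats b which beats p (b has the smaller index and ≥ value)
          subst hq
          have hbp : pvLex b q := by
            rcases lt_or_eq_of_le (le_of_not_gt h) with h' | h'
            · exact Or.inl h'
            · exact Or.inr ⟨h'.symm, hfst q List.mem_cons_self⟩
          rcases hrb with h' | h'
          · subst h'; exact Or.inr hbp
          · exact Or.inr (pvLex_trans h' hbp)
        · exact hall q hq

-- findBest = the pvStep fold over the unused elements
theorem findBest_eq_fold (pairs : List (Int × Int)) (used : PySem.Set Int) :
    findBest pairs used =
      (pairs.filter (fun p => !(PySem.Set.contains used p.1))).foldl pvStep none := by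
  unfold findBest
  rw [← PySem.List.foldl_if_eq_foldl_filter (p := fun p => !(PySem.Set.contains used p.1)) (f := pvStep)]
  apply PySem.List.foldl_congr_mem
  intro best p _
  cases hc : PySem.Set.contains used p.1 with
  | false => simp [pvStep, hc]
  | true => simp [pvStep, hc]

-- the head of a pairwise-pvLex permutation of the unused elements is what findBest returns
theorem findBest_some (pairs : List (Int × Int)) (used : PySem.Set Int)
    (m : Int × Int) (rest : List (Int × Int))
    (hfst : pairs.Pairwise (fun a b => a.1 < b.1))
    (hperm : (pairs.filter (fun p => !(PySem.Set.contains used p.1))).Perm (m :: rest))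
    (hlex : (m :: rest).Pairwise pvLex) :
    findBest pairs used = some m := by
  rw [findBest_eq_fold]
  set U := pairs.filter (fun p => !(PySem.Set.contains used p.1)) with hU
  have hUfst : U.Pairwise (fun a b => a.1 < b.1) := hfst.sublist List.filter_sublist
  have hUne : U ≠ [] := by
    intro h; rw [h] at hperm; exact (List.cons_ne_nil _ _) hperm.nil_eq.symm
  obtain ⟨u, t, hUeq⟩ := List.exists_cons_of_ne_nil hUne
  rw [hUeq] at hperm hUfst ⊢
  rw [List.foldl_cons, show pvStep none u = some u from rfl]
  rcases List.pairwise_cons.mp hUfst with ⟨hu, ht⟩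
  obtain ⟨r, hr, hmem, hru, hall⟩ := pvStep_fold_max t u ht hu
  rw [hr]
  have hrin : r ∈ u :: t := by
    rcases hmem with h' | h'
    · exact h' ▸ List.mem_cons_self
    · exact List.mem_cons_of_mem _ h'
  have hmmem : m ∈ u :: t := hperm.mem_iff.mpr List.mem_cons_self
  have hmmax : ∀ q ∈ u :: t, q = m ∨ pvLex m q := by
    intro q hq
    rcases List.mem_cons.mp (hperm.mem_iff.mp hq) with h' | h'
    · exact Or.inl h'
    · exact Or.inr ((List.pairwise_cons.mp hlex).1 q h')
  have hrmax : ∀ q ∈ u :: t, q = r ∨ pvLex r q := by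
    intro q hq
    rcases List.mem_cons.mp hq with hq | hq
    · subst hq
      rcases hru with h' | h'
      · exact Or.inl h'
      · exact Or.inr h'
    · exact hall q hq
  have hrm : r = m := by
    by_contra hne
    rcases hrmax m hmmem with h1 | h1
    · exact hne h1.symm
    · rcases hmmax r hrin with h2 | h2
      · exact hne h2
      · exact pvLex_asymm h1 h2
  rw [hrm]

-- in an index-increasing list, the index determines the pair
theorem pairwise_fst_inj :
    ∀ (l : List (Int × Int)), l.Pairwise (fun a b => a.1 < b.1) →
      ∀ a ∈ l, ∀ b ∈ l, a.1 = b.1 → a = b := by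
  intro l
  induction l with
  | nil => simp
  | cons x t ih =>
    intro hl a ha b hb hab
    rcases List.pairwise_cons.mp hl with ⟨hx, ht⟩
    rcases List.mem_cons.mp ha with ha | ha <;> rcases List.mem_cons.mp hb with hb | hb
    · rw [ha, hb]
    · exact absurd hab (by have := hx b hb; rw [ha]; omega)
    · exact absurd hab (by have := hx a ha; rw [hb]; omega)
    · exact ih ht a ha b hb hab

-- B's selection loop, run against a pairwise-pvLex arrangement S of the unused elements,
-- produces A's take-then-takeWhile prefix of S.
theorem selLoopB_spec (E : List (Int × Int)) (n : Int) (larger : Bool) (cls : Option Int)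
    (hE : E.Pairwise (fun a b => a.1 < b.1)) :
    ∀ (S : List (Int × Int)) (fuel : Nat) (used : PySem.Set Int) (acc : List Int),
      S.Pairwise pvLex →
      (E.filter (fun p => !(PySem.Set.contains used p.1))).Perm S →
      S.length ≤ fuel →
      selLoopB E n larger cls fuel used acc =
        acc ++ ((S.take (n - acc.length).toNat).takeWhile
          (fun p => !(larger && decide (p.2 < cls.getD 0)))).map (fun p => p.1) := by
  intro S
  induction S with
  | nil =>
    intro fuel used acc _ hperm _
    have hfe : E.filter (fun p => !(PySem.Set.contains used p.1)) = [] :=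
      hperm.eq_nil
    have hfb : findBest E used = none := by
      rw [findBest_eq_fold, hfe]; rfl
    cases fuel with
    | zero => simp [selLoopB]
    | succ f =>
      rw [selLoopB, hfb]
      by_cases hn : n ≤ (acc.length : Int) <;> simp [hn]
  | cons m rest ih =>
    intro fuel used acc hlex hperm hfuel
    cases fuel with
    | zero => simp at hfuel
    | succ f =>
      rw [selLoopB]
      by_cases hn : n ≤ (acc.length : Int)
      · rw [if_pos hn, show (n - (acc.length : Int)).toNat = 0 by omega]
        simp
      · rw [if_neg hn, findBest_some E used m rest hE hperm hlex]
        dsimp only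
        have htk : (n - (acc.length : Int)).toNat = (n - ((acc.length : Int) + 1)).toNat + 1 := by
          omega
        cases hkeep : larger && decide (m.2 < cls.getD 0) with
        | true =>
          rw [if_pos rfl, htk, List.take_succ_cons, List.takeWhile_cons]
          simp [hkeep]
        | false =>
          rw [if_neg (by simp)]
          -- after marking m used, the unused elements are a permutation of rest
          have hnodupE : E.Nodup := List.Pairwise.imp (fun h he => by rw [he] at h; omega) hE
          have hnodup : (m :: rest).Nodup :=
            hperm.nodup (List.Nodup.filter _ hnodupE)
          have hmE : m ∈ E := by
            have : m ∈ E.filter (fun p => !(PySem.Set.contains used p.1)) :=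
              hperm.mem_iff.mpr List.mem_cons_self
            exact List.mem_of_mem_filter this
          have hfe : E.filter (fun p => !(PySem.Set.contains (PySem.Set.add used m.1) p.1)) =
              (E.filter (fun p => !(PySem.Set.contains used p.1))).filter
                (fun p => p.1 != m.1) := by
            rw [List.filter_filter]
            apply List.filter_congr
            intro p _
            by_cases h1 : p.1 ∈ used <;> by_cases h2 : p.1 = m.1 <;>
              simp [PySem.Set.mem_add, h1, h2]
          have hrest : (m :: rest).filter (fun p => p.1 != m.1) = rest := by
            rw [List.filter_cons, if_neg (by simp)]
            apply List.filter_eq_self.mpr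
            intro q hq
            have hqE : q ∈ E := by
              have : q ∈ E.filter (fun p => !(PySem.Set.contains used p.1)) :=
                hperm.mem_iff.mpr (List.mem_cons_of_mem _ hq)
              exact List.mem_of_mem_filter this
            have : q ≠ m := fun h => (List.nodup_cons.mp hnodup).1 (h ▸ hq)
            simp only [bne_iff_ne, ne_eq]
            intro h
            exact this (pairwise_fst_inj E hE q hqE m hmE h)
          rw [ih f (PySem.Set.add used m.1) (acc ++ [m.1])
              (List.pairwise_cons.mp hlex).2
              (by rw [hfe]
                  have hpf := hperm.filter (fun p => p.1 != m.1)
                  rw [hrest] at hpf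
                  exact hpf)
              (by simpa using Nat.le_of_succ_le_succ hfuel)]
          rw [htk, List.take_succ_cons, List.takeWhile_cons]
          simp [hkeep]

-- the two ports agree under Pre_
theorem get_best_indexes_py_eq (logits : List Int) (n : Int) (larger : Bool) (cls : Option Int)
    (hpre : Pre_get_best_indexes_py logits n larger cls) :
    get_best_indexes_py logits n larger cls = get_best_indexes_py_alt logits n larger cls := by
  unfold get_best_indexes_py get_best_indexes_py_alt
  have hE : (PySem.List.enumerate logits 0).Pairwise (fun a b => a.1 < b.1) :=
    PySem.List.pairwise_lt_enumerate logits 0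
  set E := PySem.List.enumerate logits 0 with hEdef
  set S := PySem.List.sorted E (fun x => x.2) true with hSdef
  have hlex : S.Pairwise pvLex := sorted_rev_pairwise_lex E hE
  have hperm : (E.filter (fun p => !(PySem.Set.contains PySem.Set.empty p.1))).Perm S := by
    have h1 : E.filter (fun p => !(PySem.Set.contains PySem.Set.empty p.1)) = E := by
      apply List.filter_eq_self.mpr; intro a _; rfl
    rw [h1]
    exact (PySem.List.sorted_perm E (fun x => x.2) true).symm
  have hlen : S.length ≤ logits.length := by
    rw [hSdef, PySem.List.length_sorted, hEdef, PySem.List.length_enumerate]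
  rw [getBestLoopA_spec, selLoopB_spec E n larger cls hE S logits.length
      PySem.Set.empty [] hlex hperm hlen]
  simp only [List.nil_append, List.length_nil, Int.natCast_zero, Int.sub_zero]
  rcases larger with _ | _
  · have : (fun x : Int × Int => !clsBreak false cls x.2) =
        (fun p : Int × Int => !(false && decide (p.2 < cls.getD 0))) := by
      funext p; simp [clsBreak]
    rw [this]
  · cases cls with
    | some c =>
      have : (fun x : Int × Int => !clsBreak true (some c) x.2) =
          (fun p : Int × Int => !(true && decide (p.2 < (some c).getD 0))) := by
        funext p; simp [clsBreak]
      rw [this]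
    | none =>
      rcases hpre ⟨rfl, rfl⟩ with h | h
      · subst h
        have : S = [] := by
          rw [hSdef, PySem.List.sorted_eq_nil_iff, hEdef]; rfl
        rw [this]; simp
      · rw [show n.toNat = 0 by omega]; simp

-- ===== VERDICT (by name: the statement is the Claim_ definition above) =====
theorem get_best_indexes_py_spec : Claim_equal_get_best_indexes_py := by
  intro logits n larger cls _ hpre
  unfold Spec_get_best_indexes_py
  exact get_best_indexes_py_eq logits n larger cls hpre
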